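-- pv_equiv track=rewrite | github.com/nonasking/algorithm-python | string/examples/sort_string.py | solution
-- ===== SOURCE A (Python) =====
-- def solution(s):
--     big = []
--     small = []
--
--     for letter in s:
--         if letter.isupper():
--             big.append(letter)
--         else:
--             small.append(letter)
--
--     answer = ''.join(sorted(small, reverse=True) + sorted(big, reverse=True))
--
--     return answer
-- ===== SOURCE B (Python) =====
-- def solution(s):
--     small = [0] * 128
--     big = [0] * 128
--     for letter in s:
--         if letter.isupper():
--             big[ord(letter)] += 1
--         else:
--             small[ord(letter)] += 1
--     parts = []
--     for code in range(127, -1, -1):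
--         parts.append(chr(code) * small[code])
--     for code in range(127, -1, -1):
--         parts.append(chr(code) * big[code])
--     return ''.join(parts)
-- ===== Notes on version B (the rewrite author's own statement) =====
-- stated objective: faster
-- what changed: Replaced the two comparison sorts (sorted(..., reverse=True)) by a counting sort: one pass counts each ASCII code into two 128-slot tables (uppercase vs rest), then the output is emitted by scanning codes 127..0.
import Mathlib
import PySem

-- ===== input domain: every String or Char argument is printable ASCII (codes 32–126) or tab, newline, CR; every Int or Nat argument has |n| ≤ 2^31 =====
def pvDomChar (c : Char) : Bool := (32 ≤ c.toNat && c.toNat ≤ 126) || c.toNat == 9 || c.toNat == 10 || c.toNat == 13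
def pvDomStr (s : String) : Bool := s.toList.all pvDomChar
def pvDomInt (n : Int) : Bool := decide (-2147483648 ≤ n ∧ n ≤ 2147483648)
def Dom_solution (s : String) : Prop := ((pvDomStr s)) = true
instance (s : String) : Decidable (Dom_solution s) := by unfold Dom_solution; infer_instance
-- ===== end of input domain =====

-- B replaces A's two comparison sorts by a counting sort over the 128 ASCII codes.

-- ===== PORT A =====
def solution (s : String) : String :=
  let bs := s.toList.foldl
    (fun (bs : List Char × List Char) letter =>
      if PySem.Chars.isupper letter then (bs.1 ++ [letter], bs.2)
      else (bs.1, bs.2 ++ [letter]))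
    ([], [])
  String.mk (PySem.List.sorted bs.2 (fun x => x) true ++ PySem.List.sorted bs.1 (fun x => x) true)

-- ===== PORT B =====
def solution_alt (s : String) : String :=
  let cnts := s.toList.foldl
    (fun (p : List Nat × List Nat) letter =>
      if PySem.Chars.isupper letter then
        (p.1, p.2.set letter.toNat (p.2.getD letter.toNat 0 + 1))
      else
        (p.1.set letter.toNat (p.1.getD letter.toNat 0 + 1), p.2))
    (List.replicate 128 0, List.replicate 128 0)
  let emit : List Nat → List Char := fun cnt =>
    (PySem.List.pyRange 127 (-1) (-1)).flatMap
      (fun code => List.replicate (cnt.getD code.toNat 0) (Char.ofNat code.toNat))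
  String.mk (emit cnts.1 ++ emit cnts.2)

-- ===== PRECONDITION & SPEC =====
def Spec_solution (s : String) (out : String) : Prop := out = solution_alt s
instance (s : String) (out : String) : Decidable (Spec_solution s out) := by unfold Spec_solution; infer_instance

-- ===== CLAIM (what is proved, stated in full; the proofs are below) =====
def Claim_equal_solution : Prop := ∀ (s : String), Dom_solution s → Spec_solution s (solution s)

-- ===== LEMMAS AND PROOFS =====

theorem charToNat_ofNat (n : Nat) (h : n < 128) : (Char.ofNat n).toNat = n := by
  rw [Char.toNat_ofNat, if_pos]; left; omega

theorem charOfNat_eq_iff (n : Nat) (h : n < 128) (a : Char) : Char.ofNat n = a ↔ n = a.toNat := by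
  constructor
  · intro he; rw [← he, charToNat_ofNat n h]
  · intro he; subst he; exact Char.ofNat_toNat a

theorem charOfNat_le (m n : Nat) (hm : m < 128) (hn : n < 128) (h : m ≤ n) :
    Char.ofNat m ≤ Char.ofNat n := by
  rw [Char.le_def, UInt32.le_iff_toNat_le]
  show (Char.ofNat m).toNat ≤ (Char.ofNat n).toNat
  rw [charToNat_ofNat m hm, charToNat_ofNat n hn]; exact h

-- count of the emission list over a nodup code list
theorem count_emit (cnt : Nat → Nat) (a : Char) :
    ∀ ks : List Nat, (∀ k ∈ ks, k < 128) → ks.Nodup →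
    ((ks.flatMap (fun k => List.replicate (cnt k) (Char.ofNat k))).count a
      = if a.toNat ∈ ks then cnt a.toNat else 0) := by
  intro ks
  induction ks with
  | nil => simp
  | cons k t ih =>
    intro hlt hnd
    have hk : k < 128 := hlt k (by simp)
    have ht : ∀ j ∈ t, j < 128 := fun j hj => hlt j (by simp [hj])
    have hnd' := (List.nodup_cons.mp hnd).2
    have hknt := (List.nodup_cons.mp hnd).1
    simp only [List.flatMap_cons, List.count_append, ih ht hnd', List.count_replicate]
    by_cases he : k = a.toNat
    · subst he
      rw [if_pos (beq_iff_eq.mpr ((charOfNat_eq_iff _ hk a).mpr rfl)), if_neg (by simpa using hknt),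
        if_pos (by simp)]
      simp
    · rw [if_neg (fun hc => he ((charOfNat_eq_iff _ hk a).mp (beq_iff_eq.mp hc)))]
      simp only [List.mem_cons]
      by_cases hm : a.toNat ∈ t
      · rw [if_pos hm, if_pos (Or.inr hm)]; simp
      · rw [if_neg hm, if_neg (by rintro (h|h); exact he h.symm; exact hm h)]

theorem pairwise_emit (cnt : Nat → Nat) :
    ∀ ks : List Nat, (∀ k ∈ ks, k < 128) → ks.Pairwise (fun a b => b < a) →
    (ks.flatMap (fun k => List.replicate (cnt k) (Char.ofNat k))).Pairwise
      (fun a b => b ≤ a) := by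
  intro ks
  induction ks with
  | nil => simp
  | cons k t ih =>
    intro hlt hpw
    have hk : k < 128 := hlt k (by simp)
    have ht : ∀ j ∈ t, j < 128 := fun j hj => hlt j (by simp [hj])
    rw [List.flatMap_cons, List.pairwise_append]
    refine ⟨?_, ih ht (List.pairwise_cons.mp hpw).2, ?_⟩
    · exact List.pairwise_replicate.mpr (Or.inr le_rfl)
    · intro x hx y hy
      obtain ⟨j, hj, hyj⟩ := List.mem_flatMap.mp hy
      rw [List.eq_of_mem_replicate hx, List.eq_of_mem_replicate hyj]
      exact charOfNat_le j k (ht j hj) hk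
        (le_of_lt ((List.pairwise_cons.mp hpw).1 j hj))

-- sorted(xs, reverse=True) is the unique (up to equal elements) descending arrangement
theorem sorted_rev_id_eq (xs ys : List Char) (hp : ys.Perm xs)
    (hs : ys.Pairwise (fun a b => b ≤ a)) :
    PySem.List.sorted xs (fun x => x) true = ys := by
  exact ((PySem.List.sorted_perm xs _ true).trans hp.symm).eq_of_pairwise
    (fun a b _ _ h1 h2 => le_antisymm h2 h1)
    (PySem.List.sorted_pairwise_rev xs (fun x => x)) hs

-- A's pair fold is a pair of filters
theorem foldA_eq (xs : List Char) : ∀ b0 s0 : List Char,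
    xs.foldl (fun (bs : List Char × List Char) letter =>
      if PySem.Chars.isupper letter then (bs.1 ++ [letter], bs.2)
      else (bs.1, bs.2 ++ [letter])) (b0, s0)
    = (b0 ++ xs.filter PySem.Chars.isupper,
       s0 ++ xs.filter (fun c => !PySem.Chars.isupper c)) := by
  induction xs with
  | nil => simp
  | cons c t ih =>
    intro b0 s0
    by_cases h : PySem.Chars.isupper c <;>
      simp [List.foldl_cons, h, ih]

-- B's pair fold splits into two independent counting folds over the filters
theorem foldB_eq (xs : List Char) : ∀ a0 b0 : List Nat,
    xs.foldl (fun (p : List Nat × List Nat) letter =>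
      if PySem.Chars.isupper letter then
        (p.1, p.2.set letter.toNat (p.2.getD letter.toNat 0 + 1))
      else
        (p.1.set letter.toNat (p.1.getD letter.toNat 0 + 1), p.2)) (a0, b0)
    = ((xs.filter (fun c => !PySem.Chars.isupper c)).foldl
         (fun a c => a.set c.toNat (a.getD c.toNat 0 + 1)) a0,
       (xs.filter PySem.Chars.isupper).foldl
         (fun a c => a.set c.toNat (a.getD c.toNat 0 + 1)) b0) := by
  induction xs with
  | nil => simp
  | cons c t ih =>
    intro a0 b0
    by_cases h : PySem.Chars.isupper c
    · have h' : PySem.Chars.isupper c = true := h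
      simp only [List.foldl_cons, List.filter_cons, h', ite_true, Bool.not_true,
        Bool.false_eq_true, ite_false]
      rw [ih]
    · have h' : PySem.Chars.isupper c = false := by simpa using h
      simp only [List.foldl_cons, List.filter_cons, h', Bool.not_false, ite_true,
        Bool.false_eq_true, ite_false]
      rw [ih]

-- the counting fold counts occurrences
theorem foldCnt (xs : List Char) : ∀ a : List Nat, a.length = 128 →
    (∀ c ∈ xs, c.toNat < 128) → ∀ k, k < 128 →
    (xs.foldl (fun a c => a.set c.toNat (a.getD c.toNat 0 + 1)) a).getD k 0
      = a.getD k 0 + xs.count (Char.ofNat k) := by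
  induction xs with
  | nil => simp
  | cons c t ih =>
    intro a ha hcs k hk
    have hc : c.toNat < 128 := hcs c (by simp)
    have ht : ∀ x ∈ t, x.toNat < 128 := fun x hx => hcs x (by simp [hx])
    rw [List.foldl_cons, ih _ (by simp [ha]) ht k hk]
    by_cases he : c.toNat = k
    · subst he
      have hck : Char.ofNat c.toNat = c := Char.ofNat_toNat c
      rw [List.count_cons, if_pos (beq_iff_eq.mpr hck.symm)]
      rw [List.getD, List.getElem?_set_self (by omega), Option.getD_some]
      simp only [List.getD]
      omega
    · have hck : Char.ofNat k ≠ c := fun hc' => he ((charOfNat_eq_iff k hk c).mp hc').symm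
      rw [List.count_cons, if_neg (by simpa using fun hc' => hck (hc'.symm))]
      rw [List.getD, List.getElem?_set_ne he]
      rfl

-- a Dom string's characters have ASCII codes below 128
theorem dom_codes (s : String) (hd : Dom_solution s) : ∀ c ∈ s.toList, c.toNat < 128 := by
  intro c hc
  have := List.all_eq_true.mp hd c hc
  unfold pvDomChar at this
  simp only [Bool.or_eq_true, Bool.and_eq_true, decide_eq_true_eq, beq_iff_eq] at this
  omega

-- the descending emission of the counts of ys is sorted(ys, reverse=True)
theorem emit_eq_sorted (ys : List Char) (hys : ∀ c ∈ ys, c.toNat < 128) :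
    ((List.range 128).reverse.flatMap
      (fun k => List.replicate (ys.count (Char.ofNat k)) (Char.ofNat k)))
    = PySem.List.sorted ys (fun x => x) true := by
  have hks : ∀ k ∈ (List.range 128).reverse, k < 128 := by simp
  have hnd : (List.range 128).reverse.Nodup := List.nodup_reverse.mpr (List.nodup_range)
  refine (sorted_rev_id_eq ys _ ?_ ?_).symm
  · refine List.perm_iff_count.mpr fun a => ?_
    rw [count_emit _ a _ hks hnd]
    by_cases hm : a.toNat < 128
    · rw [if_pos (by simpa using hm), Char.ofNat_toNat]
    · rw [if_neg (by simpa using hm), eq_comm, List.count_eq_zero]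
      exact fun hmem => hm (hys a hmem)
  · refine pairwise_emit _ _ hks ?_
    rw [List.pairwise_reverse]
    exact List.pairwise_lt_range

-- the concrete code range of B is the descending range over the codes
theorem pyRange_codes : PySem.List.pyRange 127 (-1) (-1)
    = (List.range 128).reverse.map (Int.ofNat) := by decide

-- ===== VERDICT (by name: the statement is the Claim_ definition above) =====
theorem solution_spec : Claim_equal_solution := by
  intro s hd
  unfold Spec_solution solution solution_alt
  have hcodes := dom_codes s hd
  rw [foldA_eq, foldB_eq]
  simp only [List.nil_append]
  rw [pyRange_codes, List.flatMap_map, List.flatMap_map]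
  have key : ∀ ys : List Char, (∀ c ∈ ys, c.toNat < 128) →
      (List.range 128).reverse.flatMap
        (fun k => List.replicate
          ((ys.foldl (fun a c => a.set c.toNat (a.getD c.toNat 0 + 1))
            (List.replicate 128 0)).getD (Int.ofNat k).toNat 0)
          (Char.ofNat (Int.ofNat k).toNat))
      = PySem.List.sorted ys (fun x => x) true := by
    intro ys hys
    rw [← emit_eq_sorted ys hys]
    refine List.flatMap_congr fun k hk => ?_
    have hk' : k < 128 := by simpa using hk
    rw [show ((Int.ofNat k).toNat) = k from rfl, foldCnt ys (List.replicate 128 0) (by simp) hys k hk']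
    rw [show (List.replicate 128 (0:Nat)).getD k 0 = 0 from by
      rw [List.getD, List.getElem?_replicate, if_pos hk', Option.getD_some],
      Nat.zero_add]
  rw [key _ (fun c hc => hcodes c (List.mem_of_mem_filter hc)),
     key _ (fun c hc => hcodes c (List.mem_of_mem_filter hc))]
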